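-- pv_equiv track=rewrite | github.com/krushaybhavsar/amp-cs | 5-you-will-all-conform/conform.py | please_flip_streamlined
-- ===== SOURCE A (Python) =====
-- def please_flip_streamlined(caps: list[str]) -> list[str]:
--     """
--     Generates a minimal list of shouts needed to have all fan caps face the same direction.
--
--       Args:
--       caps: list of strings which are either 'F' (Forward) or 'B' (Backward)
--
--       Return:
--       a list of shouts, which could be empty if the list of caps is either empty or all the same direction
--     """
--
--     intervals = []
--     interval_start = 0
--     shouts = []
--
--     if len(caps) == 0:
--         return shouts
--
--     for i in range(1, len(caps) + 1):
--         if (i == len(caps)) or (caps[interval_start] != caps[i]):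
--             intervals.append((interval_start, i - 1, caps[interval_start]))
--             interval_start = i
--
--     if len(intervals) % 2 == 0:
--         flip_direction = "B"
--     else:
--         if intervals[0][2] == "F":
--             flip_direction = "B"
--         else:
--             flip_direction = "F"
--
--     for t in intervals:
--         if t[2] == flip_direction:
--             if t[0] == t[1]:
--                 shouts.append(f"Person in position {str(t[0])} flip your cap!")
--             else:
--                 shouts.append(
--                     f"People in positions {str(t[0])} through {str(t[1])} flip your caps!"
--                 )
--     return shouts
-- ===== SOURCE B (Python) =====
-- def _shout(block):
--     s, e = block
--     if s == e:
--         return f"Person in position {s} flip your cap!"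
--     return f"People in positions {s} through {e} flip your caps!"
--
--
-- def please_flip_streamlined(caps: list[str]) -> list[str]:
--     """Pick the flip direction from the pairwise transition count, then group the
--     enumerate-filtered positions of that direction into consecutive blocks."""
--     if not caps:
--         return []
--     transitions = sum(a != b for a, b in zip(caps, caps[1:]))
--     flip = "B" if (transitions + 1) % 2 == 0 or caps[0] == "F" else "F"
--     positions = [i for i, c in enumerate(caps) if c == flip]
--     shouts = []
--     cur = None
--     for p in positions:
--         if cur is not None and p == cur[1] + 1:
--             cur = (cur[0], p)
--         else:
--             if cur is not None:
--                 shouts.append(_shout(cur))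
--             cur = (p, p)
--     if cur is not None:
--         shouts.append(_shout(cur))
--     return shouts
-- ===== Notes on version B (the rewrite author's own statement) =====
-- stated objective: alternative
-- what changed: B never builds A's run-interval list: it counts pairwise transitions with zip(caps, caps[1:]) to pick the flip direction, then filters the enumerate positions of that direction and groups the resulting integer list into consecutive blocks, emitting one shout per block.
import Mathlib
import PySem

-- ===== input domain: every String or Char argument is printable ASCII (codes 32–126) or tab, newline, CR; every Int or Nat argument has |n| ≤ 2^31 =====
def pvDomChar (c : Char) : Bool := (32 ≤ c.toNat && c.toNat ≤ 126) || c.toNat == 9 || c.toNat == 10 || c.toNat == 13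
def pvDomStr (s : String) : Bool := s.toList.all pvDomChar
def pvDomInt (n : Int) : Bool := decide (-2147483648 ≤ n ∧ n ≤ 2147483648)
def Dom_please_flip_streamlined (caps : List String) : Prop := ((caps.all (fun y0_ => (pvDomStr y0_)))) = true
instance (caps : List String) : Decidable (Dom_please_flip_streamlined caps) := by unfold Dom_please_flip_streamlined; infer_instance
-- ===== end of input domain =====

-- B replaces A's run-interval scan by arithmetic on positions: a zip-pair
-- transition count picks the flip direction, then the enumerate-filtered
-- positions of that direction are grouped into consecutive integer blocks
-- (objective: alternative; same O(n) cost, no interval list over caps).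

-- ===== PORT A =====
-- A's f-string message, shared by both branches of its emission loop.
def pvMsg (s e : Nat) : String :=
  if s == e then "Person in position " ++ toString s ++ " flip your cap!"
  else "People in positions " ++ toString s ++ " through " ++ toString e ++ " flip your caps!"

-- A's for-loop over range(1, len(caps)+1) with state (intervals, interval_start).
-- All of A's list indexings are at provably in-range nonnegative indices
-- (interval_start < len whenever read; caps[i] is short-circuited away at i == len),
-- so they are ported with List.getD, which agrees with Python there.
def pvAIntervals (caps : List String) (n i start : Nat)
    (ivs : List (Nat × Nat × String)) : List (Nat × Nat × String) :=
  if h : i ≤ n then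
    if i == n || caps.getD start "" != caps.getD i "" then
      pvAIntervals caps n (i + 1) i (ivs ++ [(start, i - 1, caps.getD start "")])
    else
      pvAIntervals caps n (i + 1) start ivs
  else ivs
termination_by n + 1 - i
decreasing_by all_goals omega

def please_flip_streamlined (caps : List String) : List String :=
  if caps.length == 0 then []
  else
    let intervals := pvAIntervals caps caps.length 1 0 []
    let flip_direction :=
      if intervals.length % 2 == 0 then "B"
      else if (intervals.headD (0, 0, "")).2.2 == "F" then "B" else "F"
    intervals.foldl
      (fun shouts t =>
        if t.2.2 == flip_direction then shouts ++ [pvMsg t.1 t.2.1] else shouts) []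

-- ===== PORT B =====
-- Source B's generator 'sum(a != b for a, b in zip(caps, caps[1:]))', one pair step.
def pvTransStep (n : Nat) (p : String × String) : Nat := if p.1 != p.2 then n + 1 else n

-- Source B's _shout helper on one block (s, e) of consecutive positions.
def pvShout (b : Int × Int) : String :=
  if b.1 == b.2 then "Person in position " ++ toString b.1 ++ " flip your cap!"
  else "People in positions " ++ toString b.1 ++ " through " ++ toString b.2 ++ " flip your caps!"

-- Source B's loop body over one position p, state (shouts, cur).
def pvGroupStep (st : List String × Option (Int × Int)) (p : Int) :
    List String × Option (Int × Int) :=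
  match st.2 with
  | some c => if p == c.2 + 1 then (st.1, some (c.1, p)) else (st.1 ++ [pvShout c], some (p, p))
  | none => (st.1, some (p, p))

-- Source B's trailing 'if cur is not None: shouts.append(_shout(cur))'.
def pvFinish (st : List String × Option (Int × Int)) : List String :=
  match st.2 with
  | some c => st.1 ++ [pvShout c]
  | none => st.1

def please_flip_streamlined_alt (caps : List String) : List String :=
  if caps.isEmpty then []
  else
    let transitions := (caps.zip (caps.drop 1)).foldl pvTransStep 0
    let flip := if (transitions + 1) % 2 == 0 || caps.getD 0 "" == "F" then "B" else "F"
    let positions := ((PySem.List.enumerate caps 0).filter (fun q => q.2 == flip)).map Prod.fst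
    pvFinish (positions.foldl pvGroupStep ([], none))

-- ===== PRECONDITION & SPEC =====
def Spec_please_flip_streamlined (caps : List String) (out : List String) : Prop := out = please_flip_streamlined_alt caps
instance (caps : List String) (out : List String) : Decidable (Spec_please_flip_streamlined caps out) := by unfold Spec_please_flip_streamlined; infer_instance

-- ===== CLAIM (what is proved, stated in full; the proofs are below) =====
def Claim_equal_please_flip_streamlined : Prop := ∀ (caps : List String), Dom_please_flip_streamlined caps → Spec_please_flip_streamlined caps (please_flip_streamlined caps)

-- ===== LEMMAS AND PROOFS =====

-- What one interval contributes to A's shout fold.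
def pvEmit (flip : String) (t : Nat × Nat × String) : List String :=
  if t.2.2 == flip then [pvMsg t.1 t.2.1] else []

theorem pv_fold_emit (flip : String) (l : List (Nat × Nat × String)) (acc : List String) :
    l.foldl (fun shouts t => if t.2.2 == flip then shouts ++ [pvMsg t.1 t.2.1] else shouts) acc
      = acc ++ l.flatMap (pvEmit flip) := by
  induction l generalizing acc with
  | nil => simp
  | cons t l ih => simp only [List.foldl, ih, pvEmit, List.flatMap_cons]; split <;> simp

theorem pv_bne_comm (a b : String) : (a != b) = (b != a) := by
  by_cases h : a = b
  · simp [h]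
  · simp [bne_iff_ne.mpr h, bne_iff_ne.mpr (fun hx => h hx.symm)]

-- Proof-side indexed transition counter (links A's interval count to B's zip fold).
def pvBRuns (caps : List String) (i runs : Nat) : Nat :=
  if i < caps.length then
    pvBRuns caps (i + 1) (if caps.getD i "" != caps.getD (i - 1) "" then runs + 1 else runs)
  else runs
termination_by caps.length - i
decreasing_by all_goals omega

theorem pvBRuns_acc (caps : List String) (k : Nat) : ∀ (i acc : Nat), caps.length - i = k →
    pvBRuns caps i acc = acc + pvBRuns caps i 0 := by
  induction k with
  | zero =>
    intro i acc h
    have hni : ¬ i < caps.length := by omega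
    conv_lhs => rw [pvBRuns.eq_def]
    conv_rhs => rw [pvBRuns.eq_def]
    simp [hni]
  | succ k ih =>
    intro i acc h
    have hi : i < caps.length := by omega
    conv_lhs => rw [pvBRuns.eq_def]
    conv_rhs => rw [pvBRuns.eq_def]
    rw [if_pos hi, if_pos hi]
    by_cases hb : (caps.getD i "" != caps.getD (i - 1) "") = true
    · rw [if_pos hb, if_pos hb, ih (i + 1) (acc + 1) (by omega), ih (i + 1) (0 + 1) (by omega)]
      omega
    · rw [if_neg hb, if_neg hb, ih (i + 1) acc (by omega)]

theorem pvA_length (caps : List String) (k : Nat) :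
    ∀ (i start : Nat) (ivs : List (Nat × Nat × String)), caps.length + 1 - i = k →
    1 ≤ i → i ≤ caps.length + 1 → start < i →
    (∀ j, start ≤ j → j < i → caps.getD j "" = caps.getD start "") →
    (pvAIntervals caps caps.length i start ivs).length =
      ivs.length + (if i ≤ caps.length then 1 else 0) + pvBRuns caps i 0 := by
  induction k with
  | zero =>
    intro i start ivs hk h1 hle hs hrun
    have hgt : ¬ i ≤ caps.length := by omega
    rw [pvAIntervals.eq_def, pvBRuns.eq_def]
    simp [hgt, show ¬ i < caps.length by omega]
  | succ k ih =>
    intro i start ivs hk h1 hle hs hrun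
    have hin : i ≤ caps.length := by omega
    have him1 : caps.getD (i - 1) "" = caps.getD start "" := hrun (i - 1) (by omega) (by omega)
    rw [pvAIntervals.eq_def, dif_pos hin]
    by_cases hiN : i = caps.length
    · have hcond : (i == caps.length || caps.getD start "" != caps.getD i "") = true := by
        simp [hiN]
      rw [if_pos hcond]
      have hrunI : ∀ j, i ≤ j → j < i + 1 → caps.getD j "" = caps.getD i "" := by
        intro j hj1 hj2; have hji : j = i := (by omega)
        rw [hji]
      rw [ih (i + 1) i (ivs ++ [(start, i - 1, caps.getD start "")])
        (by omega) (by omega) (by omega) (by omega) hrunI]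
      have hb1 : pvBRuns caps (i + 1) 0 = 0 := by
        rw [pvBRuns.eq_def]; simp [show ¬ i + 1 < caps.length by omega]
      have hb2 : pvBRuns caps i 0 = 0 := by
        rw [pvBRuns.eq_def]; simp [show ¬ i < caps.length by omega]
      simp [hb1, hb2, show ¬ i + 1 ≤ caps.length by omega, hin]
    · have hiLt : i < caps.length := by omega
      have hbr : pvBRuns caps i 0 = pvBRuns caps (i + 1)
          (if caps.getD i "" != caps.getD (i - 1) "" then 1 else 0) := by
        conv_lhs => rw [pvBRuns.eq_def]
        rw [if_pos hiLt]
      by_cases heq : caps.getD start "" = caps.getD i ""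
      · have hcond : ¬ (i == caps.length || caps.getD start "" != caps.getD i "") = true := by
          rw [heq]; simp [hiN]
        rw [if_neg hcond]
        have hrunE : ∀ j, start ≤ j → j < i + 1 → caps.getD j "" = caps.getD start "" := by
          intro j hj1 hj2
          by_cases hj : j = i
          · rw [hj, ← heq]
          · exact hrun j hj1 (by omega)
        rw [ih (i + 1) start ivs (by omega) (by omega) (by omega) (by omega) hrunE, hbr]
        have hbf : ¬ (caps.getD i "" != caps.getD (i - 1) "") = true := by
          rw [him1, ← heq]; simp
        rw [if_neg hbf]
        simp [hin, show i + 1 ≤ caps.length by omega]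
      · have hcond : (i == caps.length || caps.getD start "" != caps.getD i "") = true := by
          simp only [Bool.or_eq_true, bne_iff_ne, ne_eq]
          exact Or.inr heq
        rw [if_pos hcond]
        have hrunI : ∀ j, i ≤ j → j < i + 1 → caps.getD j "" = caps.getD i "" := by
          intro j hj1 hj2
          have hji : j = i := by omega
          rw [hji]
        have hbt : (caps.getD i "" != caps.getD (i - 1) "") = true := by
          rw [him1]
          exact bne_iff_ne.mpr (fun hx => heq hx.symm)
        have hbr2 : pvBRuns caps i 0 = 1 + pvBRuns caps (i + 1) 0 := by
          conv_lhs => rw [pvBRuns.eq_def]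
          rw [if_pos hiLt, if_pos hbt]
          exact pvBRuns_acc caps (caps.length - (i + 1)) (i + 1) 1 rfl
        rw [ih (i + 1) i (ivs ++ [(start, i - 1, caps.getD start "")])
          (by omega) (by omega) (by omega) (by omega) hrunI, hbr2]
        simp only [List.length_append, List.length_cons, List.length_nil]
        repeat' split
        all_goals omega

theorem pvA_head (caps : List String) (k : Nat) :
    ∀ (i start : Nat) (ivs : List (Nat × Nat × String)), caps.length + 1 - i = k →
    1 ≤ i → i ≤ caps.length →
    ∃ e rest, pvAIntervals caps caps.length i start ivs
      = ivs ++ (start, e, caps.getD start "") :: rest := by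
  induction k with
  | zero => intro i start ivs hk h1 hle; omega
  | succ k ih =>
    intro i start ivs hk h1 hle
    rw [pvAIntervals.eq_def, dif_pos hle]
    by_cases hiN : i = caps.length
    · rw [if_pos (by simp [hiN])]
      rw [pvAIntervals.eq_def]
      rw [dif_neg (by omega)]
      exact ⟨i - 1, [], by simp⟩
    · by_cases heq : caps.getD start "" = caps.getD i ""
      · rw [if_neg (by rw [heq]; simp [hiN])]
        exact ih (i + 1) start ivs (by omega) (by omega) (by omega)
      · rw [if_pos (by simp only [Bool.or_eq_true, bne_iff_ne, ne_eq]; exact Or.inr heq)]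
        obtain ⟨e, rest, hrec⟩ := ih (i + 1) i (ivs ++ [(start, i - 1, caps.getD start "")])
          (by omega) (by omega) (by omega)
        refine ⟨i - 1, (i, e, caps.getD i "") :: rest, ?_⟩
        simp only [List.getD_eq_getElem?_getD] at hrec
        simp [hrec]

-- accumulator shift for the counting fold of B's 'sum(a != b …)'
theorem pvTrans_acc (l : List (String × String)) : ∀ (a : Nat),
    l.foldl pvTransStep a = a + l.foldl pvTransStep 0 := by
  induction l with
  | nil => intro a; simp
  | cons p rest ih =>
    intro a
    simp only [List.foldl]
    rw [ih (pvTransStep a p), ih (pvTransStep 0 p)]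
    unfold pvTransStep
    split <;> omega

-- B's zip fold counts the same boundaries as the indexed counter pvBRuns.
theorem pvZ (caps : List String) (k : Nat) : ∀ (i : Nat), caps.length - i = k →
    ((caps.drop i).zip (caps.drop (i + 1))).foldl pvTransStep 0 = pvBRuns caps (i + 1) 0 := by
  induction k with
  | zero =>
    intro i h
    have hd : caps.drop i = [] := List.drop_eq_nil_of_le (by omega)
    rw [hd, pvBRuns.eq_def]
    simp [show ¬ i + 1 < caps.length by omega]
  | succ k ih =>
    intro i h
    have hi : i < caps.length := by omega
    rw [List.drop_eq_getElem_cons hi]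
    by_cases hi1 : i + 1 < caps.length
    · have hih := ih (i + 1) (by omega)
      rw [List.drop_eq_getElem_cons hi1] at hih ⊢
      simp only [List.zip_cons_cons, List.foldl]
      rw [pvTrans_acc, hih]
      have hg1 : caps.getD (i + 1) "" = caps[i + 1] := by
        simp [List.getD_eq_getElem?_getD, List.getElem?_eq_getElem hi1]
      have hg0 : caps.getD (i + 1 - 1) "" = caps[i] := by
        simp [List.getD_eq_getElem?_getD, List.getElem?_eq_getElem hi]
      have hnorm : pvBRuns caps (i + 1 + 1) 0 = pvBRuns caps (i + 2) 0 := rfl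
      conv_rhs => rw [pvBRuns.eq_def]
      rw [if_pos hi1, hg1, hg0, hnorm]
      by_cases hb : (caps[i + 1] != caps[i]) = true
      · rw [if_pos hb, show pvBRuns caps (i + 1 + 1) (0 + 1) = pvBRuns caps (i + 2) 1 from rfl,
          pvBRuns_acc caps (caps.length - (i + 2)) (i + 2) 1 rfl]
        have hb' : (caps[i] != caps[i + 1]) = true := by rw [pv_bne_comm]; exact hb
        unfold pvTransStep
        simp only [hb', if_pos]
      · rw [if_neg hb, hnorm]
        have hb' : ¬ (caps[i] != caps[i + 1]) = true := by rw [pv_bne_comm]; exact hb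
        unfold pvTransStep
        simp [hb']
    · have hd : caps.drop (i + 1) = [] := List.drop_eq_nil_of_le (by omega)
      rw [hd, pvBRuns.eq_def]
      simp [show ¬ i + 1 < caps.length by omega]

-- positions of 'flip' in l, offset s: the list Source B's comprehension produces.
def pvPosL (l : List String) (flip : String) (s : Int) : List Int :=
  match l with
  | [] => []
  | x :: xs => (if x == flip then [s] else []) ++ pvPosL xs flip (s + 1)

theorem pvPosL_enum (flip : String) (l : List String) : ∀ (s : Int),
    ((PySem.List.enumerate l s).filter (fun q => q.2 == flip)).map Prod.fst
      = pvPosL l flip s := by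
  induction l with
  | nil => intro s; simp [pvPosL, PySem.List.enumerate_nil]
  | cons x xs ih =>
    intro s
    rw [PySem.List.enumerate_cons]
    unfold pvPosL
    by_cases hx : (x == flip) = true
    · simp [hx, ih (s + 1)]
    · simp [hx, ih (s + 1)]

theorem pvPosL_mem (flip : String) (l : List String) : ∀ (s p : Int),
    p ∈ pvPosL l flip s → s ≤ p := by
  induction l with
  | nil => intro s p hp; simp [pvPosL] at hp
  | cons x xs ih =>
    intro s p hp
    unfold pvPosL at hp
    rcases List.mem_append.mp hp with h | h
    · by_cases hx : (x == flip) = true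
      · rw [if_pos hx] at h; simp at h; omega
      · rw [if_neg hx] at h; simp at h
    · have := ih (s + 1) p h; omega

theorem pvPosL_drop (caps : List String) (flip : String) (hflip : flip ≠ "") (i : Nat)
    (hi : i ≤ caps.length) :
    pvPosL (caps.drop i) flip (i : Int)
      = (if caps.getD i "" == flip then [(i : Int)] else [])
        ++ pvPosL (caps.drop (i + 1)) flip ((i : Int) + 1) := by
  by_cases h : i < caps.length
  · have hg : caps.getD i "" = caps[i] := by
      simp [List.getD_eq_getElem?_getD, List.getElem?_eq_getElem h]
    rw [List.drop_eq_getElem_cons h, hg]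
    simp only [pvPosL]
  · have hie : i = caps.length := by omega
    have hd0 : caps.drop i = [] := List.drop_eq_nil_of_le (by omega)
    have hd1 : caps.drop (i + 1) = [] := List.drop_eq_nil_of_le (by omega)
    have hg : caps.getD i "" = "" := by
      simp [List.getD_eq_getElem?_getD, List.getElem?_eq_none (by omega : caps.length ≤ i)]
    rw [hd0, hd1, hg, if_neg (by simp [Ne.symm hflip])]
    simp [pvPosL]

-- shifting an already-emitted shout prefix out of the grouping fold
theorem pvRun_shift (l : List Int) : ∀ (sh : List String) (c : Option (Int × Int)),
    pvFinish (l.foldl pvGroupStep (sh, c)) = sh ++ pvFinish (l.foldl pvGroupStep ([], c)) := by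
  induction l with
  | nil =>
    intro sh c
    cases c <;> simp [pvFinish]
  | cons p rest ih =>
    intro sh c
    simp only [List.foldl]
    cases c with
    | none => simp only [pvGroupStep]; rw [ih sh]
    | some d =>
      simp only [pvGroupStep]
      by_cases hp : (p == d.2 + 1) = true
      · rw [if_pos hp, if_pos hp, ih sh]
      · rw [if_neg hp, if_neg hp, ih (sh ++ [pvShout d]), ih ([] ++ [pvShout d])]
        simp

-- a pending block whose successor position never occurs is flushed first
theorem pvFlush (l : List Int) (s e : Int) (hl : ∀ p ∈ l, p ≠ e + 1) :
    pvFinish (l.foldl pvGroupStep ([], some (s, e)))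
      = pvShout (s, e) :: pvFinish (l.foldl pvGroupStep ([], none)) := by
  cases l with
  | nil => simp [pvFinish]
  | cons p rest =>
    have hp : ¬ (p == e + 1) = true := by
      simp only [beq_iff_eq]
      exact hl p (List.mem_cons_self)
    simp only [List.foldl, pvGroupStep, if_neg hp, List.nil_append]
    rw [pvRun_shift rest [pvShout (s, e)]]
    simp

theorem pvShout_cast (s e : Nat) : pvShout ((s : Int), (e : Int)) = pvMsg s e := by
  have ht : ∀ n : Nat, toString ((n : Int)) = toString n := fun n => rfl
  unfold pvShout pvMsg
  by_cases h : s = e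
  · rw [if_pos (by simp [h]), if_pos (by simp [h]), ht s]
  · rw [if_neg (by simpa using h), if_neg (by simpa using h), ht s, ht e]

-- main bridge: A's remaining intervals emit exactly what B's grouping fold,
-- seeded with the pending block of the current run, will produce.
theorem pvL (caps : List String) (flip : String) (hflip : flip ≠ "") (k : Nat) :
    ∀ (i start : Nat) (ivs : List (Nat × Nat × String)), caps.length + 1 - i = k →
    1 ≤ i → i ≤ caps.length + 1 → start < i →
    (∀ j, start ≤ j → j < i → caps.getD j "" = caps.getD start "") →
    (pvAIntervals caps caps.length i start ivs).flatMap (pvEmit flip) =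
      ivs.flatMap (pvEmit flip) ++
      pvFinish ((pvPosL (caps.drop i) flip (i : Int)).foldl pvGroupStep
        ([], if caps.getD start "" == flip then some ((start : Int), (i : Int) - 1) else none)) := by
  induction k with
  | zero =>
    intro i start ivs hk h1 hle hs hrun
    have hgt : ¬ i ≤ caps.length := by omega
    have hd : caps.drop i = [] := List.drop_eq_nil_of_le (by omega)
    have hst : caps.getD start "" = caps.getD (caps.length) "" ∨ start = caps.length := by
      by_cases hsl : start < caps.length
      · exact Or.inl ((hrun caps.length (by omega) (by omega)).symm)
      · exact Or.inr (by omega)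
    have hempty : caps.getD start "" = "" := by
      rcases hst with h | h
      · rw [h]; simp [List.getD_eq_getElem?_getD]
      · rw [h]; simp [List.getD_eq_getElem?_getD]
    rw [pvAIntervals.eq_def, dif_neg hgt, hd, hempty, if_neg (by simp [Ne.symm hflip])]
    simp [pvPosL, pvFinish]
  | succ k ih =>
    intro i start ivs hk h1 hle hs hrun
    have hin : i ≤ caps.length := by omega
    rw [pvAIntervals.eq_def, dif_pos hin,
      pvPosL_drop caps flip hflip i hin]
    have hcast : ((i : Int) + 1) = ((i + 1 : Nat) : Int) := by push_cast; ring
    have hgN : caps.length ≤ i → caps.getD i "" = "" := by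
      intro h
      simp [List.getD_eq_getElem?_getD, List.getElem?_eq_none h]
    by_cases hcond : (i == caps.length || caps.getD start "" != caps.getD i "") = true
    · rw [if_pos hcond]
      have hrunI : ∀ j, i ≤ j → j < i + 1 → caps.getD j "" = caps.getD i "" := by
        intro j hj1 hj2; have hji : j = i := by omega
        rw [hji]
      rw [ih (i + 1) i (ivs ++ [(start, i - 1, caps.getD start "")])
        (by omega) (by omega) (by omega) (by omega) hrunI]
      have hflat : (ivs ++ [(start, i - 1, caps.getD start "")]).flatMap (pvEmit flip)
          = ivs.flatMap (pvEmit flip) ++ pvEmit flip (start, i - 1, caps.getD start "") := by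
        simp
      rw [hflat, List.append_assoc]
      congr 1
      have hcast2 : ((i + 1 : Nat) : Int) - 1 = (i : Int) := by push_cast; ring
      rw [hcast, hcast2]
      by_cases e1 : (caps.getD i "" == flip) = true
      · -- current position i starts a new flip block; previous run is not flip
        have hiN : i ≠ caps.length := by
          intro h
          rw [hgN (by omega)] at e1
          simp [Ne.symm hflip] at e1
        have hne : caps.getD start "" ≠ caps.getD i "" := by
          rcases Bool.or_eq_true_iff.mp hcond with h | h
          · exact absurd (by simpa using h) hiN
          · exact bne_iff_ne.mp h
        have e2 : ¬ (caps.getD start "" == flip) = true := by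
          simp only [beq_iff_eq] at e1 ⊢
          rw [e1] at hne
          exact hne
        rw [if_pos e1, if_pos e1, if_neg e2]
        simp only [pvEmit, if_neg e2, List.nil_append, List.singleton_append, List.foldl]
        have hstep : pvGroupStep ([], none) ((i : Nat) : Int)
            = ([], some (((i : Nat) : Int), ((i : Nat) : Int))) := rfl
        rw [hstep]
      · rw [if_neg e1, if_neg e1, List.nil_append]
        by_cases e2 : (caps.getD start "" == flip) = true
        · rw [if_pos e2]
          have hmem : ∀ p ∈ pvPosL (caps.drop (i + 1)) flip ((i + 1 : Nat) : Int),
              p ≠ (i : Int) - 1 + 1 := by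
            intro p hp
            have := pvPosL_mem flip (caps.drop (i + 1)) _ p hp
            push_cast at this ⊢
            omega
          rw [pvFlush _ _ _ hmem]
          have hcast3 : ((i : Int)) - 1 = ((i - 1 : Nat) : Int) := by
            push_cast [Nat.cast_sub h1]; ring
          rw [hcast3, pvShout_cast]
          have he2 : caps.getD start "" = flip := by simpa using e2
          rw [List.getD_eq_getElem?_getD] at he2
          simp [pvEmit, he2]
        · rw [if_neg e2]
          have he2 : ¬ caps.getD start "" = flip := by simpa using e2
          rw [List.getD_eq_getElem?_getD] at he2
          simp [pvEmit, he2]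
    · rw [if_neg hcond]
      have hiN : i ≠ caps.length := by
        intro h; apply hcond; simp [h]
      have heq : caps.getD start "" = caps.getD i "" := by
        by_contra h
        exact hcond (by simp only [Bool.or_eq_true, bne_iff_ne, ne_eq]; exact Or.inr h)
      have hrunE : ∀ j, start ≤ j → j < i + 1 → caps.getD j "" = caps.getD start "" := by
        intro j hj1 hj2
        by_cases hj : j = i
        · rw [hj, ← heq]
        · exact hrun j hj1 (by omega)
      rw [ih (i + 1) start ivs (by omega) (by omega) (by omega) (by omega) hrunE]
      congr 1
      have hcast2 : ((i + 1 : Nat) : Int) - 1 = (i : Int) := by push_cast; ring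
      rw [hcast, hcast2]
      by_cases e2 : (caps.getD start "" == flip) = true
      · have e1 : (caps.getD i "" == flip) = true := by rw [← heq]; exact e2
        rw [if_pos e2, if_pos e1, if_pos e2]
        simp only [List.singleton_append, List.foldl]
        have hstep : pvGroupStep ([], some ((start : Int), (i : Int) - 1)) (i : Int)
            = ([], some ((start : Int), (i : Int))) := by
          simp [pvGroupStep]
        rw [hstep]
      · have e1 : ¬ (caps.getD i "" == flip) = true := by rw [← heq]; exact e2
        rw [if_neg e2, if_neg e1, if_neg e2]
        simp

-- ===== VERDICT (by name: the statement is the Claim_ definition above) =====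
theorem please_flip_streamlined_spec : Claim_equal_please_flip_streamlined := by
  unfold Claim_equal_please_flip_streamlined Spec_please_flip_streamlined
  intro caps _
  by_cases h0 : caps.length = 0
  · have hnil : caps = [] := List.eq_nil_of_length_eq_zero h0
    subst hnil
    rfl
  · have hn : 1 ≤ caps.length := by omega
    have hnee : caps ≠ [] := by
      intro h; subst h; simp at h0
    have hc1 : ¬ ((caps.length == 0) = true) := by simp [h0]
    have hc2 : ¬ (caps.isEmpty = true) := by simp [List.isEmpty_iff, hnee]
    unfold please_flip_streamlined please_flip_streamlined_alt
    rw [if_neg hc1, if_neg hc2]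
    simp only []
    have hrun0 : ∀ j, 0 ≤ j → j < 1 → caps.getD j "" = caps.getD 0 "" := by
      intro j _ hj
      have hj0 : j = 0 := by omega
      rw [hj0]
    -- A's interval count is the transition count + 1
    have htrans : (caps.zip (caps.drop 1)).foldl pvTransStep 0 = pvBRuns caps 1 0 := by
      have := pvZ caps caps.length 0 (by omega)
      simpa using this
    have hlen : (pvAIntervals caps caps.length 1 0 []).length
        = (caps.zip (caps.drop 1)).foldl pvTransStep 0 + 1 := by
      rw [pvA_length caps (caps.length + 1 - 1) 1 0 [] rfl (by omega) (by omega) (by omega) hrun0,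
        htrans]
      simp [hn]
      omega
    obtain ⟨e, rest, hI⟩ :=
      pvA_head caps (caps.length + 1 - 1) 1 0 [] rfl (by omega) hn
    have hhead : ((pvAIntervals caps caps.length 1 0 []).headD (0, 0, "")).2.2
        = caps.getD 0 "" := by rw [hI]; simp
    have hflip : (if ((pvAIntervals caps caps.length 1 0 []).length % 2 == 0) = true then "B"
        else if (((pvAIntervals caps caps.length 1 0 []).headD (0, 0, "")).2.2 == "F") = true
          then "B" else "F")
        = (if (((caps.zip (caps.drop 1)).foldl pvTransStep 0 + 1) % 2 == 0
              || caps.getD 0 "" == "F") = true then "B" else "F") := by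
      rw [hlen, hhead]
      by_cases hp : (((caps.zip (caps.drop 1)).foldl pvTransStep 0 + 1) % 2 == 0) = true
      · rw [if_pos hp, if_pos (by rw [hp]; simp)]
      · have hb1 : (((caps.zip (caps.drop 1)).foldl pvTransStep 0 + 1) % 2 == 0) = false := by
          revert hp
          cases (((caps.zip (caps.drop 1)).foldl pvTransStep 0 + 1) % 2 == 0) <;> simp
        rw [if_neg hp, hb1, Bool.false_or]
    rw [hflip, pv_fold_emit]
    set flip := (if (((caps.zip (caps.drop 1)).foldl pvTransStep 0 + 1) % 2 == 0
        || caps.getD 0 "" == "F") = true then "B" else "F") with hflipdef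
    have hflipne : flip ≠ "" := by
      rw [hflipdef]; split <;> simp
    rw [pvL caps flip hflipne (caps.length + 1 - 1) 1 0 [] rfl (by omega) (by omega)
      (by omega) hrun0]
    rw [pvPosL_enum flip caps 0]
    have hexp : pvPosL caps flip 0
        = (if caps.getD 0 "" == flip then [(0 : Int)] else [])
          ++ pvPosL (caps.drop 1) flip 1 := by
      have := pvPosL_drop caps flip hflipne 0 (by omega)
      simpa using this
    rw [hexp]
    by_cases h00 : (caps.getD 0 "" == flip) = true
    · rw [if_pos h00, if_pos h00]
      simp only [List.flatMap_nil, List.nil_append, List.singleton_append, List.foldl]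
      have hstep : pvGroupStep ([], none) ((0 : Int)) = ([], some (0, 0)) := rfl
      rw [hstep]
      norm_num
    · rw [if_neg h00, if_neg h00]
      simp only [List.flatMap_nil, List.nil_append]
      norm_num
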